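-- pv_equiv track=rewrite | github.com/Kodis0/ReferalSystem | backend/referrals/gamification.py | calculate_referral_league_id
-- ===== SOURCE A (Python) =====
-- REFERRAL_LEAGUE_TIERS_DESC: tuple[tuple[str, int, int, int], ...] = (
--     ("ultra", 15_000_000, 30, 60),
--     ("diamond", 5_000_000, 25, 45),
--     ("platinum", 1_500_000, 20, 30),
--     ("gold", 500_000, 10, 14),
--     ("silver", 75_000, 5, 7),
--     ("bronze", 15_000, 2, 3),
-- )
--
-- def calculate_referral_league_id(sales_rub: int, level: int, streak_days: int) -> str:
--     """Highest league whose sales, level, and streak gates all pass."""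
--     s = max(0, int(sales_rub))
--     lv = max(1, int(level))
--     st = max(0, int(streak_days))
--     for league_id, sales_min, level_min, streak_min in REFERRAL_LEAGUE_TIERS_DESC:
--         if s >= sales_min and lv >= level_min and st >= streak_min:
--             return league_id
--     return "start"
-- ===== SOURCE B (Python) =====
-- REFERRAL_LEAGUE_TIERS_DESC: tuple[tuple[str, int, int, int], ...] = (
--     ("ultra", 15_000_000, 30, 60),
--     ("diamond", 5_000_000, 25, 45),
--     ("platinum", 1_500_000, 20, 30),
--     ("gold", 500_000, 10, 14),
--     ("silver", 75_000, 5, 7),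
--     ("bronze", 15_000, 2, 3),
-- )
--
-- def calculate_referral_league_id(sales_rub: int, level: int, streak_days: int) -> str:
--     """Each gate column is monotone-decreasing, so each gate passes on a suffix
--     of tiers; the answer sits at the max of the three first-pass indices."""
--     s = max(0, int(sales_rub))
--     lv = max(1, int(level))
--     st = max(0, int(streak_days))
--     table = REFERRAL_LEAGUE_TIERS_DESC
--     n = len(table)
--     i_sales = next((i for i, t in enumerate(table) if s >= t[1]), n)
--     i_level = next((i for i, t in enumerate(table) if lv >= t[2]), n)
--     i_streak = next((i for i, t in enumerate(table) if st >= t[3]), n)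
--     i = max(i_sales, i_level, i_streak)
--     return table[i][0] if i < n else "start"
-- ===== Notes on version B (the rewrite author's own statement) =====
-- stated objective: alternative
-- what changed: Replaces the single scan that re-tests all three gates per tier with three independent first-pass-index searches (one per monotone gate column) combined by max, indexing the tier table once.
import Mathlib
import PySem

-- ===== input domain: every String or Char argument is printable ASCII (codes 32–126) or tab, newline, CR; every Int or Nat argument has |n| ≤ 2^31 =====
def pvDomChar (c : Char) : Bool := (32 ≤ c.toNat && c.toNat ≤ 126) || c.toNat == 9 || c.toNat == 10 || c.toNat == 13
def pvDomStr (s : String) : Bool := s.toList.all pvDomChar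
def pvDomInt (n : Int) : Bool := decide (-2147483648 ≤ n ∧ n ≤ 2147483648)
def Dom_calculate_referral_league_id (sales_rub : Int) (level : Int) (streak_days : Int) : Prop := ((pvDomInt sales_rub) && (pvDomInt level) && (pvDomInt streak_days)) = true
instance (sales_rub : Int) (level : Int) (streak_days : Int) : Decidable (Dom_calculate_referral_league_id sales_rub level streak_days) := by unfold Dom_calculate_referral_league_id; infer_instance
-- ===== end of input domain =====

-- B replaces A's single combined scan with three independent per-gate first-pass-index
-- searches (each gate column is monotone) combined by max; objective: alternative.


def pvTiers : List (String × Int × Int × Int) :=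
  [("ultra", 15000000, 30, 60),
   ("diamond", 5000000, 25, 45),
   ("platinum", 1500000, 20, 30),
   ("gold", 500000, 10, 14),
   ("silver", 75000, 5, 7),
   ("bronze", 15000, 2, 3)]

-- ===== PORT A =====
-- A's for-loop with early return over the tier table
def pvLoopA (s lv st : Int) : List (String × Int × Int × Int) → String
  | [] => "start"
  | (league_id, sales_min, level_min, streak_min) :: rest =>
      if s ≥ sales_min ∧ lv ≥ level_min ∧ st ≥ streak_min then league_id
      else pvLoopA s lv st rest

def calculate_referral_league_id (sales_rub : Int) (level : Int) (streak_days : Int) : String :=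
  let s := max 0 sales_rub
  let lv := max 1 level
  let st := max 0 streak_days
  pvLoopA s lv st pvTiers

-- ===== PORT B =====
-- next((i for i, t in enumerate(table) if v >= f t), len(table))
def pvFirstIdx (v : Int) (f : String × Int × Int × Int → Int) : List (String × Int × Int × Int) → Nat
  | [] => 0
  | t :: rest => if v ≥ f t then 0 else pvFirstIdx v f rest + 1

def calculate_referral_league_id_alt (sales_rub : Int) (level : Int) (streak_days : Int) : String :=
  let s := max 0 sales_rub
  let lv := max 1 level
  let st := max 0 streak_days
  let i_sales := pvFirstIdx s (fun t => t.2.1) pvTiers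
  let i_level := pvFirstIdx lv (fun t => t.2.2.1) pvTiers
  let i_streak := pvFirstIdx st (fun t => t.2.2.2) pvTiers
  let i := max i_sales (max i_level i_streak)
  match pvTiers[i]? with
  | some t => t.1
  | none => "start"

-- ===== PRECONDITION & SPEC =====
def Spec_calculate_referral_league_id (sales_rub : Int) (level : Int) (streak_days : Int) (out : String) : Prop := out = calculate_referral_league_id_alt sales_rub level streak_days
instance (sales_rub : Int) (level : Int) (streak_days : Int) (out : String) : Decidable (Spec_calculate_referral_league_id sales_rub level streak_days out) := by unfold Spec_calculate_referral_league_id; infer_instance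

-- ===== CLAIM (what is proved, stated in full; the proofs are below) =====
def Claim_equal_calculate_referral_league_id : Prop := ∀ (sales_rub : Int) (level : Int) (streak_days : Int), Dom_calculate_referral_league_id sales_rub level streak_days → Spec_calculate_referral_league_id sales_rub level streak_days (calculate_referral_league_id sales_rub level streak_days)

-- ===== LEMMAS AND PROOFS =====
theorem pvFirstIdx_eq_zero (v : Int) (f : String × Int × Int × Int → Int)
    (L : List (String × Int × Int × Int)) (h : ∀ u ∈ L, f u ≤ v) :
    pvFirstIdx v f L = 0 := by
  cases L with
  | nil => rfl
  | cons t r =>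
      have := h t (by simp)
      simp [pvFirstIdx, this]

-- the combined scan equals the max-of-first-indices formula on any table whose
-- three gate columns are monotone decreasing
theorem pv_gen (s lv st : Int) (L : List (String × Int × Int × Int))
    (hmono : L.Pairwise (fun a b => b.2.1 ≤ a.2.1 ∧ b.2.2.1 ≤ a.2.2.1 ∧ b.2.2.2 ≤ a.2.2.2)) :
    pvLoopA s lv st L =
      (match L[max (pvFirstIdx s (fun t => t.2.1) L)
        (max (pvFirstIdx lv (fun t => t.2.2.1) L)
             (pvFirstIdx st (fun t => t.2.2.2) L))]? with
       | some t => t.1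
       | none => "start") := by
  induction L with
  | nil => rfl
  | cons t r ih =>
      obtain ⟨hhead, htail⟩ := List.pairwise_cons.mp hmono
      obtain ⟨tid, sm, lm, stm⟩ := t
      by_cases hs : s ≥ sm <;> by_cases hl : lv ≥ lm <;> by_cases hst : st ≥ stm
      · simp [pvLoopA, pvFirstIdx, hs, hl, hst]
      all_goals
        have hA : pvLoopA s lv st ((tid, sm, lm, stm) :: r) = pvLoopA s lv st r := by
          simp [pvLoopA, hs, hl, hst]
        rw [hA, ih htail]
        have z1 : s ≥ sm → pvFirstIdx s (fun t => t.2.1) r = 0 :=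
          fun h => pvFirstIdx_eq_zero _ _ _ (fun u hu => le_trans (hhead u hu).1 h)
        have z2 : lv ≥ lm → pvFirstIdx lv (fun t => t.2.2.1) r = 0 :=
          fun h => pvFirstIdx_eq_zero _ _ _ (fun u hu => le_trans (hhead u hu).2.1 h)
        have z3 : st ≥ stm → pvFirstIdx st (fun t => t.2.2.2) r = 0 :=
          fun h => pvFirstIdx_eq_zero _ _ _ (fun u hu => le_trans (hhead u hu).2.2 h)
        have r1 : pvFirstIdx s (fun t => t.2.1) ((tid, sm, lm, stm) :: r) =
            if s ≥ sm then 0 else pvFirstIdx s (fun t => t.2.1) r + 1 := rfl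
        have r2 : pvFirstIdx lv (fun t => t.2.2.1) ((tid, sm, lm, stm) :: r) =
            if lv ≥ lm then 0 else pvFirstIdx lv (fun t => t.2.2.1) r + 1 := rfl
        have r3 : pvFirstIdx st (fun t => t.2.2.2) ((tid, sm, lm, stm) :: r) =
            if st ≥ stm then 0 else pvFirstIdx st (fun t => t.2.2.2) r + 1 := rfl
        have hidx : max (pvFirstIdx s (fun t => t.2.1) ((tid, sm, lm, stm) :: r))
            (max (pvFirstIdx lv (fun t => t.2.2.1) ((tid, sm, lm, stm) :: r))
                 (pvFirstIdx st (fun t => t.2.2.2) ((tid, sm, lm, stm) :: r))) =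
            max (pvFirstIdx s (fun t => t.2.1) r)
              (max (pvFirstIdx lv (fun t => t.2.2.1) r)
                   (pvFirstIdx st (fun t => t.2.2.2) r)) + 1 := by
          rw [r1, r2, r3]
          split_ifs <;>
            (try rw [z1 (by assumption)]) <;>
            (try rw [z2 (by assumption)]) <;>
            (try rw [z3 (by assumption)]) <;> omega
        rw [hidx]
        simp

theorem pv_core (s lv st : Int) :
    pvLoopA s lv st pvTiers =
      (match pvTiers[max (pvFirstIdx s (fun t => t.2.1) pvTiers)
        (max (pvFirstIdx lv (fun t => t.2.2.1) pvTiers)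
             (pvFirstIdx st (fun t => t.2.2.2) pvTiers))]? with
       | some t => t.1
       | none => "start") :=
  pv_gen s lv st pvTiers (by decide)

-- ===== VERDICT (by name: the statement is the Claim_ definition above) =====
theorem calculate_referral_league_id_spec : Claim_equal_calculate_referral_league_id := by
  intro sales_rub level streak_days _
  unfold Spec_calculate_referral_league_id calculate_referral_league_id calculate_referral_league_id_alt
  exact pv_core _ _ _
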